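-- pv_equiv track=rewrite | github.com/iossifovlab/gpf | dae/dae/tools/generate_configs.py | group_and_format
-- ===== SOURCE A (Python) =====
-- def group_and_format(items, width=5, sep=',', tabs=1):
--     grouped = []
--     while True:
--         if len(items) > width:
--             group = items[:width]
--             grouped.append(sep.join(group))
--             items = items[width:]
--         else:
--             grouped.append(sep.join(items))
--             break
--     group_sep = sep
--     if tabs:
--         group_sep += '\n' + ('\t' * tabs)
--     return group_sep.join(grouped)
-- ===== SOURCE B (Python) =====
-- def group_and_format(items, width=5, sep=',', tabs=1):
--     if not items:
--         return ''
--     group_sep = sep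
--     if tabs:
--         group_sep += '\n' + '\t' * tabs
--     out = items[0]
--     for i, item in enumerate(items[1:], 1):
--         out += (group_sep if i % width == 0 else sep) + item
--     return out
-- ===== Notes on version B (the rewrite author's own statement) =====
-- stated objective: alternative
-- what changed: Single positional pass that picks the separator per boundary via i % width, instead of repeatedly slicing the list into chunks, joining each chunk, then joining the chunks.
import Mathlib
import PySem

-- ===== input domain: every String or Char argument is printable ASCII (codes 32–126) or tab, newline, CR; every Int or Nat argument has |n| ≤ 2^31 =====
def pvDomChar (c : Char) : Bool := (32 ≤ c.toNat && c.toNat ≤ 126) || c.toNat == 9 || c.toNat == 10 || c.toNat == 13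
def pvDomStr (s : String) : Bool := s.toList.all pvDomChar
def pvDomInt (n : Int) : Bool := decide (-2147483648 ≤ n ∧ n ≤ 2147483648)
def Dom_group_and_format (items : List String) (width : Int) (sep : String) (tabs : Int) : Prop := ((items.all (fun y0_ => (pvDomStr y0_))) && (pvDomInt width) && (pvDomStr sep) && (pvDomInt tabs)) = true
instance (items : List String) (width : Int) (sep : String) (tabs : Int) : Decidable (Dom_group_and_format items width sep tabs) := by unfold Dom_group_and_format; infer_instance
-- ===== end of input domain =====

-- B replaces A's repeated slicing into chunks (slice, join each chunk, join the chunks) by one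
-- positional pass choosing the separator per boundary with i % width (alternative decomposition).

-- ===== PORT A =====
-- group_sep = sep; if tabs: group_sep += '\n' + '\t'*tabs   (identical line in A and in B's source;
-- '\t'*tabs is ported exactly as list repetition of the single char, String.ofList ∘ pyRepeat)
def pvGroupSep (sep : String) (tabs : Int) : String :=
  if tabs ≠ 0 then sep ++ ("\n" ++ String.ofList (PySem.List.pyRepeat ['\t'] tabs)) else sep

-- the 'while True' loop of A; fuel only makes the recursion total (items.length + 1 steps always
-- suffice when width ≥ 1; for width ≤ 0 Python A diverges, which Pre_ excludes)
def pvALoop (width : Int) (sep : String) : Nat → List String → List String → List String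
  | 0, _items, grouped => grouped
  | fuel+1, items, grouped =>
    if (items.length : Int) > width then
      pvALoop width sep fuel (PySem.List.slice items (some width) none)
        (grouped ++ [PySem.Str.join sep (PySem.List.slice items none (some width))])
    else grouped ++ [PySem.Str.join sep items]

def group_and_format (items : List String) (width : Int) (sep : String) (tabs : Int) : String :=
  let grouped := pvALoop width sep (items.length + 1) items []
  let group_sep := pvGroupSep sep tabs
  PySem.Str.join group_sep grouped

-- ===== PORT B =====
def group_and_format_alt (items : List String) (width : Int) (sep : String) (tabs : Int) : String :=
  if items = [] then "" else
    let group_sep := pvGroupSep sep tabs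
    (PySem.List.enumerate (PySem.List.slice items (some 1) none) 1).foldl
      (fun out p => out ++ ((if PySem.Int.mod p.1 width = 0 then group_sep else sep) ++ p.2))
      (PySem.List.pyGetD items 0 "")

-- ===== PRECONDITION & SPEC =====
-- For width ≤ 0 Python A loops forever (it never shrinks items), except when the list is empty
-- and width is zero, where it returns normally — Pre_ admits exactly the inputs where A returns.
def Pre_group_and_format (items : List String) (width : Int) (sep : String) (tabs : Int) : Prop :=
  0 < width ∨ (items = [] ∧ width = 0)
instance (items : List String) (width : Int) (sep : String) (tabs : Int) : Decidable (Pre_group_and_format items width sep tabs) := by unfold Pre_group_and_format; infer_instance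

def pvWitness_group_and_format : List String × Int × String × Int := (["aa", "b", "c"], 2, ",", 1)

def Spec_group_and_format (items : List String) (width : Int) (sep : String) (tabs : Int) (out : String) : Prop := out = group_and_format_alt items width sep tabs
instance (items : List String) (width : Int) (sep : String) (tabs : Int) (out : String) : Decidable (Spec_group_and_format items width sep tabs out) := by unfold Spec_group_and_format; infer_instance

-- ===== CLAIM (what is proved, stated in full; the proofs are below) =====
def Claim_equal_group_and_format : Prop := ∀ (items : List String) (width : Int) (sep : String) (tabs : Int), Dom_group_and_format items width sep tabs → Pre_group_and_format items width sep tabs → Spec_group_and_format items width sep tabs (group_and_format items width sep tabs)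

-- ===== LEMMAS AND PROOFS =====

-- the loop of B, on plain data: index i, pending output out
def pvBLoop (w : Nat) (sep gs : String) : List String → Nat → String → String
  | [], _i, out => out
  | y :: ys, i, out => pvBLoop w sep gs ys (i+1) (out ++ ((if i % w = 0 then gs else sep) ++ y))

-- the list of chunk-joins that A's loop accumulates
def pvChunks (w : Nat) (sep : String) (items : List String) : List String :=
  if h : items.length ≤ w ∨ w = 0 then [PySem.Str.join sep items]
  else PySem.Str.join sep (items.take w) :: pvChunks w sep (items.drop w)
termination_by items.length
decreasing_by simp only [List.length_drop]; omega

theorem pv_join_single (sep x : String) : PySem.Str.join sep [x] = x := by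
  simp [PySem.Str.join, PySem.Chars.join_singleton]

theorem pv_join_cons₂ (sep x y : String) (t : List String) :
    PySem.Str.join sep (x :: y :: t) = x ++ sep ++ PySem.Str.join sep (y :: t) := by
  simp [PySem.Str.join, PySem.Chars.join_cons_cons, String.append_assoc]

theorem pv_foldl_prefix (sep : String) (t : List String) : ∀ (p a : String),
    t.foldl (fun a y => a ++ (sep ++ y)) (p ++ a) = p ++ t.foldl (fun a y => a ++ (sep ++ y)) a := by
  induction t with
  | nil => intro p a; rfl
  | cons y t ih => intro p a; simp only [List.foldl_cons, String.append_assoc, ih]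

theorem pv_join_foldl (sep : String) (t : List String) : ∀ x : String,
    PySem.Str.join sep (x :: t) = t.foldl (fun a y => a ++ (sep ++ y)) x := by
  induction t with
  | nil => intro x; exact pv_join_single sep x
  | cons y t ih =>
      intro x
      rw [pv_join_cons₂, ih y, List.foldl_cons, pv_foldl_prefix sep t x (sep ++ y),
        pv_foldl_prefix sep t sep y, String.append_assoc]

theorem pvChunks_ne_nil (w : Nat) (sep : String) (items : List String) :
    pvChunks w sep items ≠ [] := by
  unfold pvChunks; split <;> simp

theorem pvBLoop_seg (w : Nat) (sep gs : String) (ys : List String) : ∀ (i : Nat) (x : String),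
    0 < i → i + ys.length ≤ w →
    pvBLoop w sep gs ys i x = ys.foldl (fun a y => a ++ (sep ++ y)) x := by
  induction ys with
  | nil => intro i x _ _; rfl
  | cons y ys ih =>
      intro i x hi hle
      simp only [List.length_cons] at hle
      have hmod : i % w = i := Nat.mod_eq_of_lt (by omega)
      simp only [pvBLoop, List.foldl_cons, hmod]
      rw [if_neg (by omega)]
      exact ih (i+1) _ (by omega) (by omega)

theorem pvBLoop_append (w : Nat) (sep gs : String) (ys : List String) : ∀ (zs : List String) (i : Nat) (x : String),
    pvBLoop w sep gs (ys ++ zs) i x = pvBLoop w sep gs zs (i + ys.length) (pvBLoop w sep gs ys i x) := by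
  induction ys with
  | nil => intro zs i x; simp [pvBLoop]
  | cons y ys ih =>
      intro zs i x
      simp only [List.cons_append, pvBLoop, ih, List.length_cons]
      congr 1
      omega

theorem pvBLoop_shift (w : Nat) (sep gs : String) (ys : List String) : ∀ (i : Nat) (x : String),
    pvBLoop w sep gs ys (i + w) x = pvBLoop w sep gs ys i x := by
  induction ys with
  | nil => intro i x; rfl
  | cons y ys ih =>
      intro i x
      simp only [pvBLoop, Nat.add_mod_right]
      have : i + w + 1 = (i + 1) + w := by omega
      rw [this, ih]

theorem pvBLoop_prefix (w : Nat) (sep gs : String) (ys : List String) : ∀ (i : Nat) (p a : String),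
    pvBLoop w sep gs ys i (p ++ a) = p ++ pvBLoop w sep gs ys i a := by
  induction ys with
  | nil => intro i p a; rfl
  | cons y ys ih => intro i p a; simp only [pvBLoop, String.append_assoc, ih]

theorem pvBLoop_chunks (w : Nat) (hw : 0 < w) (sep gs : String) :
    ∀ (n : Nat) (items : List String), items.length = n → ∀ x : String,
    pvBLoop w sep gs items 1 x = PySem.Str.join gs (pvChunks w sep (x :: items)) := by
  intro n
  induction n using Nat.strong_induction_on with
  | _ n ih =>
    intro items hn x
    by_cases hle : items.length + 1 ≤ w
    · -- a single chunk
      rw [pvChunks]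
      rw [dif_pos (by left; simpa using hle)]
      rw [pv_join_single, pv_join_foldl]
      exact pvBLoop_seg w sep gs items 1 x (by omega) (by omega)
    · -- first chunk of w, then recurse
      have hlen : w ≤ items.length := by omega
      have hsplit := List.take_append_drop (w - 1) items
      have hdroplen : w - 1 < items.length := by omega
      have hw1 : w - 1 + 1 = w := by omega
      have hdrop : items.drop (w - 1) = items[w - 1] :: items.drop w := by
        have hd := List.drop_eq_getElem_cons hdroplen
        rw [hw1] at hd
        exact hd
      set y := items[w - 1] with hy
      set rest := items.drop w with hrest
      have htakelen : (items.take (w - 1)).length = w - 1 := by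
        simp [List.length_take]; omega
      -- run B's loop through the first chunk
      conv_lhs => rw [← hsplit]
      rw [pvBLoop_append, pvBLoop_seg w sep gs _ 1 x (by omega) (by rw [htakelen]; omega), htakelen, hdrop]
      have h1w : 1 + (w - 1) = w := by omega
      rw [h1w]
      simp only [pvBLoop]
      rw [if_pos (Nat.mod_self w)]
      have hwsh : w + 1 = 1 + w := by omega
      rw [hwsh, pvBLoop_shift]
      have hassoc : (List.foldl (fun a y => a ++ (sep ++ y)) x (items.take (w - 1))) ++ (gs ++ y)
          = ((List.foldl (fun a y => a ++ (sep ++ y)) x (items.take (w - 1))) ++ gs) ++ y := by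
        rw [String.append_assoc]
      rw [hassoc, pvBLoop_prefix]
      have hrlen : rest.length < n := by
        simp only [hrest, List.length_drop]; omega
      rw [ih rest.length hrlen rest rfl y]
      -- now assemble the right-hand side
      have hcond : ¬ ((x :: items).length ≤ w ∨ w = 0) := by
        simp only [List.length_cons]; omega
      have htake : (x :: items).take w = x :: items.take (w - 1) := by
        have h3 : (x :: items).take (w - 1 + 1) = x :: items.take (w - 1) := List.take_succ_cons
        rw [hw1] at h3; exact h3
      have hdrop2 : (x :: items).drop w = y :: rest := by
        have h2 : (x :: items).drop (w - 1 + 1) = items.drop (w - 1) := List.drop_succ_cons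
        rw [hw1] at h2
        rw [h2, hdrop, hrest]
      conv_rhs => rw [pvChunks]
      rw [dif_neg hcond, htake, hdrop2]
      obtain ⟨c, cs, hcc⟩ : ∃ c cs, pvChunks w sep (y :: rest) = c :: cs := by
        cases h : pvChunks w sep (y :: rest) with
        | nil => exact absurd h (pvChunks_ne_nil w sep _)
        | cons c cs => exact ⟨c, cs, rfl⟩
      rw [hcc, pv_join_cons₂, ← hcc, pv_join_foldl, String.append_assoc]

theorem pvALoop_spec (w : Nat) (hw : 0 < w) (sep : String) :
    ∀ (fuel : Nat) (items : List String) (acc : List String), items.length < fuel →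
    pvALoop (w : Int) sep fuel items acc = acc ++ pvChunks w sep items := by
  intro fuel
  induction fuel with
  | zero => intro items acc h; omega
  | succ fuel ih =>
      intro items acc h
      rw [pvALoop]
      by_cases hgt : ((items.length : Int) > (w : Int))
      · have hlt : w < items.length := by exact_mod_cast hgt
        rw [if_pos hgt]
        rw [PySem.List.slice_from_natCast, PySem.List.slice_to_natCast]
        rw [ih _ _ (by simp [List.length_drop]; omega)]
        have hcond : ¬ (items.length ≤ w ∨ w = 0) := by omega
        conv_rhs => rw [pvChunks]
        rw [dif_neg hcond]
        simp [List.append_assoc]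
      · have hle : items.length ≤ w := by omega
        rw [if_neg hgt, pvChunks, dif_pos (Or.inl hle)]

-- B's enumerate-fold is pvBLoop
theorem pv_enum_bLoop (w : Nat) (sep gs : String) (ys : List String) : ∀ (s : Nat) (out : String),
    (PySem.List.enumerate ys (s : Int)).foldl
      (fun out p => out ++ ((if PySem.Int.mod p.1 (w : Int) = 0 then gs else sep) ++ p.2)) out
    = pvBLoop w sep gs ys s out := by
  induction ys with
  | nil => intro s out; simp [PySem.List.enumerate_nil, pvBLoop]
  | cons y ys ih =>
      intro s out
      rw [PySem.List.enumerate_cons, List.foldl_cons]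
      have hc : ((s : Int) + 1) = ((s + 1 : Nat) : Int) := by push_cast; ring
      rw [hc, ih]
      simp only [pvBLoop, PySem.Int.mod_natCast]
      by_cases hmod : s % w = 0
      · rw [if_pos (by exact_mod_cast hmod), if_pos hmod]
      · rw [if_neg (by exact_mod_cast hmod), if_neg hmod]

-- ===== VERDICT (by name: the statement is the Claim_ definition above) =====
theorem group_and_format_spec : Claim_equal_group_and_format := by
  intro items width sep tabs _dom hpre
  unfold Spec_group_and_format
  cases items with
  | nil =>
      have hnn : ¬ ((0 : Int) > width) := by
        rcases hpre with h | ⟨_, h⟩ <;> omega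
      have hj0 : PySem.Str.join sep [] = "" := by
        simp [PySem.Str.join, PySem.Chars.join, List.intercalate]
      simp only [group_and_format, group_and_format_alt, pvALoop, List.length_nil,
        Int.natCast_zero, if_neg hnn, List.nil_append]
      rw [if_pos trivial, hj0, pv_join_single]
  | cons x xs =>
      have hwpos : 0 < width := by
        rcases hpre with h | ⟨h, _⟩
        · exact h
        · exact absurd h (by simp)
      set w := width.toNat with hwdef
      have hwcast : width = (w : Int) := by omega
      have hw : 0 < w := by omega
      rw [group_and_format, group_and_format_alt, if_neg (by simp)]
      rw [hwcast]
      rw [pvALoop_spec w hw sep _ _ [] (by omega), List.nil_append]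
      rw [PySem.List.slice_from_one, List.tail_cons]
      have h0 : PySem.List.pyGetD (x :: xs) (0 : Int) "" = x := PySem.List.pyGetD_zero_cons x xs ""
      rw [h0]
      have h1 : (1 : Int) = ((1 : Nat) : Int) := rfl
      rw [h1, pv_enum_bLoop w sep (pvGroupSep sep tabs) xs 1 x]
      rw [pvBLoop_chunks w hw sep (pvGroupSep sep tabs) xs.length xs rfl x]
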